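-- pv_equiv track=rewrite | github.com/folio-org/folio-tools | kubernetes-utilities/ci-cleanup/module-cleanup/kube-cleanup.py | make_svcid
-- ===== SOURCE A (Python) =====
-- def make_svcid(name):
--     '''
--     Take a module id that has been transformed
--     to be kubernetes compliant (all lower, dots replaced
--     with hyphens) and return a semvar compliant module id.
--     '''
--     if "snapshot" in name:
--         split = name.split("-snapshot")
--         snapshot_version = "SNAPSHOT" + split[-1].replace("-", ".")
--         release_parts = split[0].split('-')
--     else:
--         release_parts = name.split('-')
--         snapshot_version = False
--
--     for i in range(len(release_parts)):
--         if  release_parts[i].isdigit() and i != range(len(release_parts))[-1]: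
--             release_parts[i] = release_parts[i] + '.'
--         elif i != range(len(release_parts))[-1]:
--             release_parts[i] = release_parts[i] + '-'
--         else:
--             pass
--     release = ''.join(release_parts)
--
--     if snapshot_version:
--         svcid = "{}-{}".format(release, snapshot_version)
--     else:
--         svcid = release
--
--     return svcid
-- ===== SOURCE B (Python) =====
-- def make_svcid(name):
--     if "snapshot" in name:
--         split = name.split("-snapshot")
--         head = split[0]
--         suffix = "-SNAPSHOT" + split[-1].replace("-", ".")
--     else:
--         head = name
--         suffix = ""
--     # single character-level scan: emit each char; at a dash emit '.' iff the
--     # token accumulated since the previous dash is a nonempty all-digit run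
--     out = []
--     tok = ""
--     for ch in head:
--         if ch == '-':
--             out.append('.' if tok.isdigit() else '-')
--             tok = ""
--         else:
--             out.append(ch)
--             tok += ch
--     return ''.join(out) + suffix
-- ===== Notes on version B (the rewrite author's own statement) =====
-- stated objective: alternative
-- what changed: B never builds or rewrites the token list: the '-snapshot' handling stays, but the release string is produced by one character-level scan that copies each character and, at every dash, emits '.' or '-' according to whether the run accumulated since the previous dash is a nonempty all-digit token, replacing A's split / index-loop-with-mutation / join pipeline.
import Mathlib
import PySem

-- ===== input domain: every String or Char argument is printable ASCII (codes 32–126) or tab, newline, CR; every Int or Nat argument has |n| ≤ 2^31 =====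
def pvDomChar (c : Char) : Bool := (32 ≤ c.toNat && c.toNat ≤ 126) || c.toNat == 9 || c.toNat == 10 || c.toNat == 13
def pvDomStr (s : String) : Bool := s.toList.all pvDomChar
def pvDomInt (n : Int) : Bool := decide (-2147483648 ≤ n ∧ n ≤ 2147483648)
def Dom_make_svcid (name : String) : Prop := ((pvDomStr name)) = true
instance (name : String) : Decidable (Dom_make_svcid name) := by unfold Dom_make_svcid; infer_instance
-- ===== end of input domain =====

-- B keeps the '-snapshot' handling but replaces A's split / index-loop-with-mutation / join
-- pipeline for the release part by one character-level scan that copies every character and,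
-- at each dash, emits '.' or '-' depending on whether the run accumulated since the previous
-- dash is a nonempty all-digit token; objective: alternative decomposition, no speed claim.

-- ===== PORT A =====
-- A's loop 'for i in range(len(release_parts))' is ported as a fold over List.range of the list's
-- length (the length is invariant under the in-place element updates, so re-evaluating
-- len(release_parts) each iteration gives the same value); 'i != range(len(...))[-1]' is
-- i ≠ n - 1, exact because the split lists are never empty (str.split always returns ≥ 1 piece,
-- so range(n)[-1] never raises and equals n-1). split[0] / split[-1] are PySem.List.pyGetD at
-- 0 / -1 (always in range, same reason). snapshot_version is Option (List Char): none = False.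
def make_svcid (name : String) : String :=
  let cs := name.toList
  let rp_sv : List (List Char) × Option (List Char) :=
    if PySem.Chars.isIn "snapshot".toList cs then
      let split := PySem.Chars.splitOn cs "-snapshot".toList
      let snapshot_version :=
        "SNAPSHOT".toList ++ PySem.Chars.replace (PySem.List.pyGetD split (-1) []) ['-'] ['.']
      (PySem.Chars.splitOn (PySem.List.pyGetD split 0 []) ['-'], some snapshot_version)
    else
      (PySem.Chars.splitOn cs ['-'], none)
  let release_parts := rp_sv.1
  let n := release_parts.length
  let rp := (List.range n).foldl (fun ps i =>
      let t := ps.getD i []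
      if PySem.Chars.strIsdigit t && decide (i ≠ n - 1) then ps.set i (t ++ ['.'])
      else if decide (i ≠ n - 1) then ps.set i (t ++ ['-'])
      else ps) release_parts
  let release := PySem.Chars.join [] rp
  match rp_sv.2 with
  | some v => if v = [] then String.ofList release else String.ofList (release ++ ['-'] ++ v)
  | none => String.ofList release

-- ===== PORT B =====
-- the for-loop over the characters of head carries the pair (out, tok); ''.join(out) of the
-- list of 1-character strings is the concatenation, so out is carried as a List Char directly.
def make_svcid_alt (name : String) : String :=
  let cs := name.toList
  let hs : List Char × List Char :=
    if PySem.Chars.isIn "snapshot".toList cs then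
      let split := PySem.Chars.splitOn cs "-snapshot".toList
      (PySem.List.pyGetD split 0 [],
       "-SNAPSHOT".toList ++ PySem.Chars.replace (PySem.List.pyGetD split (-1) []) ['-'] ['.'])
    else (cs, [])
  let r := hs.1.foldl (fun (s : List Char × List Char) ch =>
      if ch = '-' then (s.1 ++ [if PySem.Chars.strIsdigit s.2 then '.' else '-'], [])
      else (s.1 ++ [ch], s.2 ++ [ch])) ([], [])
  String.ofList (r.1 ++ hs.2)

-- ===== PRECONDITION & SPEC =====
def Spec_make_svcid (name : String) (out : String) : Prop := out = make_svcid_alt name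
instance (name : String) (out : String) : Decidable (Spec_make_svcid name out) := by unfold Spec_make_svcid; infer_instance

-- ===== CLAIM (what is proved, stated in full; the proofs are below) =====
def Claim_equal_make_svcid : Prop := ∀ (name : String), Dom_make_svcid name → Spec_make_svcid name (make_svcid name)

-- ===== LEMMAS AND PROOFS =====

-- separator A appends after a non-last token
def pvSep (t : List Char) : List Char :=
  if PySem.Chars.strIsdigit t then ['.'] else ['-']

-- the dash-or-dot-joined tail: pvJ prev rest = sep(prev) ++ u₁ ++ sep(u₁) ++ u₂ ++ …
def pvJ : List Char → List (List Char) → List Char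
  | _, [] => []
  | p, u :: rest => pvSep p ++ u ++ pvJ u rest

-- structural split on '-' : (first token, remaining tokens)
def pvSplit : List Char → List Char × List (List Char)
  | [] => ([], [])
  | a :: r =>
    if a = '-' then ([], (pvSplit r).1 :: (pvSplit r).2)
    else (a :: (pvSplit r).1, (pvSplit r).2)

theorem pvJoin_cons (a : List Char) (l : List (List Char)) :
    PySem.Chars.join [] (a :: l) = a ++ PySem.Chars.join [] l := by
  cases l <;> simp [PySem.Chars.join, List.intercalate, List.intersperse]

-- splitOn with the single-char separator '-' computes pvSplit
theorem pvSplitOn_go (fuel : Nat) : ∀ (l cur : List Char) (acc : List (List Char)),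
    l.length < fuel →
    PySem.Chars.splitOn.go ['-'] fuel l cur acc
      = acc.reverse ++ (cur.reverse ++ (pvSplit l).1) :: (pvSplit l).2 := by
  induction fuel with
  | zero => intro l cur acc h; omega
  | succ fuel ih =>
      intro l cur acc h
      cases l with
      | nil => simp [PySem.Chars.splitOn.go, pvSplit]
      | cons a r =>
          by_cases ha : a = '-'
          · subst ha
            have hpre : List.isPrefixOf ['-'] ('-' :: r) = true := by
              simp [List.isPrefixOf]
            rw [PySem.Chars.splitOn.go]
            simp only [hpre, if_true, List.length_singleton, List.drop_succ_cons, List.drop_zero]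
            rw [ih r [] ((cur.reverse) :: acc) (by simpa using Nat.lt_of_succ_lt_succ h)]
            simp [pvSplit]
          · have hpre : List.isPrefixOf ['-'] (a :: r) = false := by
              simp [List.isPrefixOf]; exact fun hh => absurd hh.symm ha
            rw [PySem.Chars.splitOn.go]
            simp only [hpre, Bool.false_eq_true, if_false]
            rw [ih r (a :: cur) acc (by simpa using Nat.lt_of_succ_lt_succ h)]
            simp [pvSplit, ha, List.append_assoc]

theorem pvSplitOn_eq (cs : List Char) :
    PySem.Chars.splitOn cs ['-'] = (pvSplit cs).1 :: (pvSplit cs).2 := by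
  unfold PySem.Chars.splitOn
  rw [pvSplitOn_go (cs.length + 1) cs [] [] (Nat.lt_succ_self _)]
  simp

-- invariant of A's index loop: after the first m iterations, position i < m holds
-- xs[i] (++ sep) and positions ≥ m are untouched
theorem pvLoopA_go (xs : List (List Char)) (m : Nat) (hm : m ≤ xs.length) :
    (List.range m).foldl (fun ps i =>
      let t := ps.getD i []
      if PySem.Chars.strIsdigit t && decide (i ≠ xs.length - 1) then ps.set i (t ++ ['.'])
      else if decide (i ≠ xs.length - 1) then ps.set i (t ++ ['-'])
      else ps) xs
    = xs.mapIdx (fun i t => if i < m ∧ i ≠ xs.length - 1 then t ++ pvSep t else t) := by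
  induction m with
  | zero =>
      simp only [List.range_zero, List.foldl_nil]
      apply List.ext_getElem <;> simp
  | succ m ih =>
      rw [List.range_succ, List.foldl_append]
      rw [ih (Nat.le_of_succ_le hm)]
      simp only [List.foldl_cons, List.foldl_nil]
      have hlt : m < xs.length := hm
      have hget : (xs.mapIdx (fun i t => if i < m ∧ i ≠ xs.length - 1 then t ++ pvSep t else t)).getD m []
          = xs[m] := by
        rw [List.getD_eq_getElem?_getD, List.getElem?_eq_getElem (by simpa using hlt)]
        simp [List.getElem_mapIdx]
      by_cases hlast : m = xs.length - 1
      · -- last index: the loop body leaves the list unchanged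
        have hdec : decide (m ≠ xs.length - 1) = false := by simp [hlast]
        simp only [hget, hdec, Bool.and_false, Bool.false_eq_true, if_false]
        apply List.ext_getElem
        · simp
        · intro j hj hj'
          have hjx : j < xs.length := by simpa using hj'
          simp only [List.getElem_mapIdx]
          have hiff : (j < m ∧ j ≠ xs.length - 1) ↔ (j < m + 1 ∧ j ≠ xs.length - 1) := by omega
          simp only [hiff]
      · -- non-last index: position m becomes xs[m] ++ pvSep xs[m]
        have key : ((xs.mapIdx (fun i t => if i < m ∧ i ≠ xs.length - 1 then t ++ pvSep t else t)).set m
              (xs[m] ++ pvSep xs[m]))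
            = xs.mapIdx (fun i t => if i < m + 1 ∧ i ≠ xs.length - 1 then t ++ pvSep t else t) := by
          apply List.ext_getElem
          · simp
          · intro j hj hj'
            have hjx : j < xs.length := by simpa using hj'
            rw [List.getElem_set]
            by_cases hjm : m = j
            · subst hjm
              simp only [List.getElem_mapIdx]
              simp [hlast]
            · rw [if_neg hjm]
              simp only [List.getElem_mapIdx]
              have hiff : (j < m ∧ j ≠ xs.length - 1) ↔ (j < m + 1 ∧ j ≠ xs.length - 1) := by omega
              simp only [hiff]
        simp only [hget, hlast, ne_eq, not_false_eq_true, decide_true, Bool.and_true, if_true]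
        by_cases hd : PySem.Chars.strIsdigit xs[m] = true
        · rw [if_pos hd]
          rw [show (['.'] : List Char) = pvSep xs[m] by simp [pvSep, hd]]
          exact key
        · rw [if_neg hd]
          rw [show (['-'] : List Char) = pvSep xs[m] by simp [pvSep, hd]]
          exact key

-- A's loop result, joined, in terms of pvJ: head token, then the separated tail
theorem pvA_join (rest : List (List Char)) : ∀ t : List Char,
    PySem.Chars.join []
      ((t :: rest).mapIdx (fun i u => if i < (t :: rest).length ∧ i ≠ (t :: rest).length - 1 then u ++ pvSep u else u))
    = t ++ pvJ t rest := by
  induction rest with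
  | nil => intro t; simp [pvJ]
  | cons u rest ih =>
      intro t
      rw [List.mapIdx_cons]
      have hfun : (fun (i : Nat) (v : List Char) =>
            if i + 1 < (t :: u :: rest).length ∧ i + 1 ≠ (t :: u :: rest).length - 1 then v ++ pvSep v else v)
          = (fun (i : Nat) (v : List Char) =>
            if i < (u :: rest).length ∧ i ≠ (u :: rest).length - 1 then v ++ pvSep v else v) := by
        funext i v
        congr 1
        simp only [List.length_cons, eq_iff_iff]
        omega
      rw [hfun]
      have h0 : (if 0 < (t :: u :: rest).length ∧ 0 ≠ (t :: u :: rest).length - 1 then t ++ pvSep t else t)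
          = t ++ pvSep t := by
        rw [if_pos]; exact ⟨by simp, by simp⟩
      rw [h0, pvJoin_cons, ih u]
      simp [pvJ]

-- B's scan, functionally: the characters emitted from cs when the pending token is tok
def pvScan : List Char → List Char → List Char
  | _, [] => []
  | tok, a :: r => if a = '-' then pvSep tok ++ pvScan [] r else a :: pvScan (tok ++ [a]) r

-- B's fold with accumulator (out, tok) computes out ++ pvScan tok cs
theorem pvB_fold (cs : List Char) : ∀ out tok : List Char,
    (cs.foldl (fun (s : List Char × List Char) ch =>
        if ch = '-' then (s.1 ++ [if PySem.Chars.strIsdigit s.2 then '.' else '-'], [])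
        else (s.1 ++ [ch], s.2 ++ [ch])) (out, tok)).1
    = out ++ pvScan tok cs := by
  induction cs with
  | nil => intro out tok; simp [pvScan]
  | cons a r ih =>
      intro out tok
      simp only [List.foldl_cons]
      by_cases ha : a = '-'
      · subst ha
        rw [if_pos rfl, ih]
        simp [pvScan, pvSep]
        split_ifs <;> simp
      · rw [if_neg ha, ih]
        simp [pvScan, if_neg ha]

-- the scan emits exactly the first token followed by the dash-or-dot-joined tail
theorem pvScan_eq (cs : List Char) : ∀ tok : List Char,
    pvScan tok cs = (pvSplit cs).1 ++ pvJ (tok ++ (pvSplit cs).1) (pvSplit cs).2 := by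
  induction cs with
  | nil => intro tok; simp [pvScan, pvSplit, pvJ]
  | cons a r ih =>
      intro tok
      by_cases ha : a = '-'
      · subst ha
        rw [show pvScan tok ('-'::r) = pvSep tok ++ pvScan [] r from by simp [pvScan]]
        simp only [pvSplit, if_pos]
        rw [ih []]
        simp [pvJ]
      · simp only [pvScan, pvSplit, ha, if_false]
        rw [ih (tok ++ [a])]
        simp [List.append_assoc]

-- core equality: A's mutate-then-join over the '-'-split tokens equals B's character scan
theorem pvCore (cs : List Char) :
    PySem.Chars.join []
      ((List.range (PySem.Chars.splitOn cs ['-']).length).foldl (fun ps i =>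
        let t := ps.getD i []
        if PySem.Chars.strIsdigit t && decide (i ≠ (PySem.Chars.splitOn cs ['-']).length - 1) then ps.set i (t ++ ['.'])
        else if decide (i ≠ (PySem.Chars.splitOn cs ['-']).length - 1) then ps.set i (t ++ ['-'])
        else ps) (PySem.Chars.splitOn cs ['-']))
    = (cs.foldl (fun (s : List Char × List Char) ch =>
        if ch = '-' then (s.1 ++ [if PySem.Chars.strIsdigit s.2 then '.' else '-'], [])
        else (s.1 ++ [ch], s.2 ++ [ch])) ([], [])).1 := by
  rw [pvB_fold, pvScan_eq]
  rw [pvLoopA_go (PySem.Chars.splitOn cs ['-']) (PySem.Chars.splitOn cs ['-']).length (le_refl _)]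
  rw [pvSplitOn_eq]
  rw [pvA_join]
  simp

-- ===== VERDICT (by name: the statement is the Claim_ definition above) =====
theorem make_svcid_spec : Claim_equal_make_svcid := by
  intro name _
  unfold Spec_make_svcid make_svcid make_svcid_alt
  by_cases h : PySem.Chars.isIn "snapshot".toList name.toList = true
  · simp only [h, if_true]
    rw [pvCore]
    have hSN : ("SNAPSHOT".toList : List Char) = ['S','N','A','P','S','H','O','T'] := rfl
    have hSN2 : ("-SNAPSHOT".toList : List Char) = ['-','S','N','A','P','S','H','O','T'] := rfl
    simp [hSN, hSN2, List.append_assoc]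
  · simp only [h, if_false, Bool.false_eq_true]
    rw [pvCore]
    simp
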